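-- pv_equiv track=rewrite | github.com/JackCollinson/practice | codingbat/logic_2.py | luck_sum
-- ===== SOURCE A (Python) =====
-- def luck_sum(a, b, c):
--     nums = [a,b,c]
--     for i in range(len(nums)):
--         if nums[i] == 13:
--             j = i
--             while j < len(nums):
--                 nums[j] = 0
--                 j += 1
--     return sum(nums)
-- ===== SOURCE B (Python) =====
-- def luck_sum(a, b, c):
--     if a == 13:
--         return 0
--     if b == 13:
--         return a
--     if c == 13:
--         return a + b
--     return a + b + c
-- ===== Notes on version B (the rewrite author's own statement) =====
-- stated objective: simpler
-- what changed: Replaced the list build + nested index/while loops with mutation by a flat early-return case analysis on the first position holding 13.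
import Mathlib
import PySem

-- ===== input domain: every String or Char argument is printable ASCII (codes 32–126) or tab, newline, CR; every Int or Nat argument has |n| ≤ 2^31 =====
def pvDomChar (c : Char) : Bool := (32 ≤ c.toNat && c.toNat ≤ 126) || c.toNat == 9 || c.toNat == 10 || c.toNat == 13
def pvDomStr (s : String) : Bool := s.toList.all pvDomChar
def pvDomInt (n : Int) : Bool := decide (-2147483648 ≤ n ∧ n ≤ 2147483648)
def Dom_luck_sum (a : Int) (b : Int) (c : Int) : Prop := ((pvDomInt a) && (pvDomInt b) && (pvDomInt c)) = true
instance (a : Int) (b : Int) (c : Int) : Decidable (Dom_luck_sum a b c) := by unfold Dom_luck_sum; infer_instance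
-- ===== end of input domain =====

-- B replaces A's list build and nested zeroing loops with a flat early-return case analysis on the first position holding 13 (simpler).


-- ===== PORT A =====
-- inner 'while j < len(nums): nums[j] = 0; j += 1' (mutation ported as List.set)
def luckZeroFrom (nums : List Int) (j : Nat) : List Int :=
  if _h : j < nums.length then luckZeroFrom (nums.set j 0) (j + 1) else nums
  termination_by nums.length - j
  decreasing_by simp_all; omega

-- nums[i] is always in range here, so getD is exact for Python's nums[i]
def luck_sum (a : Int) (b : Int) (c : Int) : Int :=
  let nums : List Int := [a, b, c]
  let nums := (List.range nums.length).foldl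
    (fun ns i => if ns.getD i 0 == 13 then luckZeroFrom ns i else ns) nums
  nums.sum

-- ===== PORT B =====
def luck_sum_alt (a : Int) (b : Int) (c : Int) : Int :=
  if a == 13 then 0
  else if b == 13 then a
  else if c == 13 then a + b
  else a + b + c

-- ===== PRECONDITION & SPEC =====
def Spec_luck_sum (a : Int) (b : Int) (c : Int) (out : Int) : Prop := out = luck_sum_alt a b c
instance (a : Int) (b : Int) (c : Int) (out : Int) : Decidable (Spec_luck_sum a b c out) := by unfold Spec_luck_sum; infer_instance

-- ===== CLAIM (what is proved, stated in full; the proofs are below) =====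
def Claim_equal_luck_sum : Prop := ∀ (a : Int) (b : Int) (c : Int), Dom_luck_sum a b c → Spec_luck_sum a b c (luck_sum a b c)

-- ===== LEMMAS AND PROOFS =====

-- ===== VERDICT (by name: the statement is the Claim_ definition above) =====
theorem lz2 (x y z : Int) : luckZeroFrom [x, y, z] 2 = [x, y, 0] := by
  unfold luckZeroFrom; norm_num; unfold luckZeroFrom; norm_num

theorem lz1 (x y z : Int) : luckZeroFrom [x, y, z] 1 = [x, 0, 0] := by
  unfold luckZeroFrom; norm_num [lz2]

theorem lz0 (x y z : Int) : luckZeroFrom [x, y, z] 0 = [0, 0, 0] := by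
  unfold luckZeroFrom; norm_num [lz1]

theorem luck_sum_spec : Claim_equal_luck_sum := by
  intro a b c _
  unfold Spec_luck_sum
  simp only [luck_sum, luck_sum_alt]
  by_cases ha : a = 13 <;> by_cases hb : b = 13 <;> by_cases hc : c = 13 <;>
    simp [ha, hb, hc, List.range_succ, lz0, lz1, lz2] <;> ring
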